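-- pv_equiv track=rewrite | github.com/thisElazar/ledarcade | tools/build_signs.py | _snap_to_palette
-- ===== SOURCE A (Python) =====
-- def _color_dist_sq(c1, c2):
--     return (c1[0]-c2[0])**2 + (c1[1]-c2[1])**2 + (c1[2]-c2[2])**2
--
-- def _snap_to_palette(pixels, palette):
--     cache = {}
--     result = []
--     for row in pixels:
--         new_row = []
--         for pixel in row:
--             if pixel in cache:
--                 new_row.append(cache[pixel])
--             else:
--                 best = min(palette, key=lambda c: _color_dist_sq(pixel, c))
--                 cache[pixel] = best
--                 new_row.append(best)
--         result.append(tuple(new_row))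
--     return tuple(result)
-- ===== SOURCE B (Python) =====
-- def _color_dist_sq(c1, c2):
--     return (c1[0]-c2[0])**2 + (c1[1]-c2[1])**2 + (c1[2]-c2[2])**2
--
-- def _snap_to_palette(pixels, palette):
--     # Palette-major relaxation: one sweep over the palette relaxes a flat
--     # per-pixel (best distance, best color) array; no cache, no per-pixel min().
--     flat = [p for row in pixels for p in row]
--     state = [(None, None)] * len(flat)
--     for c in palette:
--         state = [(d, b) if d is not None and _color_dist_sq(p, c) >= d
--                  else (_color_dist_sq(p, c), c)
--                  for (d, b), p in zip(state, flat)]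
--     best = [b for (d, b) in state]
--     out = []
--     for row in pixels:
--         out.append(tuple(best[:len(row)]))
--         best = best[len(row):]
--     return tuple(out)
-- ===== Notes on version B (the rewrite author's own statement) =====
-- stated objective: alternative
-- what changed: B replaces A's per-pixel nearest-palette scan with a memo cache by a palette-major relaxation: one sweep over the palette relaxes a flat per-pixel (best-distance, best-color) array with a strict-improvement rule (ties keep the earlier palette color, as min does), then the flat result is re-chunked into rows.
import Mathlib
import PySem

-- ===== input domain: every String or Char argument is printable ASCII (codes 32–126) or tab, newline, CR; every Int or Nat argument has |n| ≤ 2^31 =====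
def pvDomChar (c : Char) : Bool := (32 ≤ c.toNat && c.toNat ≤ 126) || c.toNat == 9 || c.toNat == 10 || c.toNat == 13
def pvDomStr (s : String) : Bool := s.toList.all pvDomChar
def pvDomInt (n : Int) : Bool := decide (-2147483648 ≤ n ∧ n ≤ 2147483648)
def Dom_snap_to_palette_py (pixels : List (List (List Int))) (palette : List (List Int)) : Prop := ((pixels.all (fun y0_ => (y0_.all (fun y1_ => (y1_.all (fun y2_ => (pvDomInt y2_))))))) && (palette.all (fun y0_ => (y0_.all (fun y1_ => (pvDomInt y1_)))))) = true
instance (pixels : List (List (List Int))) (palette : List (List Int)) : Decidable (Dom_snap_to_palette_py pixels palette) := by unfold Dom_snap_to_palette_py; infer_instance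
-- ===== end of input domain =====

-- B replaces A's per-pixel nearest-scan-with-memo-cache by a palette-major relaxation sweep over a
-- flat per-pixel (best-distance, best-color) array, then re-chunks into rows; return value only.

-- ===== PORT A =====
-- _color_dist_sq; pyGetD 0 is exact under Pre_ (all color lists have length ≥ 3 where it is called)
def pvColorDistSq (c1 c2 : List Int) : Int :=
  (PySem.List.pyGetD c1 0 0 - PySem.List.pyGetD c2 0 0) ^ 2 +
  (PySem.List.pyGetD c1 1 0 - PySem.List.pyGetD c2 1 0) ^ 2 +
  (PySem.List.pyGetD c1 2 0 - PySem.List.pyGetD c2 2 0) ^ 2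

def snap_to_palette_py (pixels : List (List (List Int))) (palette : List (List Int)) : List (List (List Int)) :=
  -- cache = {}; result = []; nested for-loops with membership test in the cache.
  -- min(palette, key=…) raises on an empty palette: .getD [] is never reached under Pre_.
  (pixels.foldl
    (fun (st : PySem.Dict (List Int) (List Int) × List (List (List Int))) row =>
      let inner := row.foldl
        (fun (s : PySem.Dict (List Int) (List Int) × List (List Int)) pixel =>
          match s.1.get? pixel with
          | some v => (s.1, s.2 ++ [v])
          | none =>
            let best := (PySem.List.min? palette (fun c => pvColorDistSq pixel c)).getD []
            (s.1.insert pixel best, s.2 ++ [best]))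
        (st.1, [])
      (inner.1, st.2 ++ [inner.2]))
    (PySem.Dict.empty, [])).2

-- ===== PORT B =====
def snap_to_palette_py_alt (pixels : List (List (List Int))) (palette : List (List Int)) : List (List (List Int)) :=
  -- flat = [p for row in pixels for p in row]
  let flat := pixels.flatMap (fun row => row)
  -- state = [(None, None)] * len(flat)
  let state0 : List (Option Int × Option (List Int)) := List.replicate flat.length (none, none)
  -- for c in palette: state = [(d,b) if d is not None and dist(p,c) >= d else (dist(p,c), c) …]
  let state := palette.foldl
    (fun (state : List (Option Int × Option (List Int))) c =>
      (state.zip flat).map (fun sp =>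
        match sp.1.1 with
        | some d => if pvColorDistSq sp.2 c ≥ d then sp.1 else (some (pvColorDistSq sp.2 c), some c)
        | none => (some (pvColorDistSq sp.2 c), some c)))
    state0
  -- best = [b for (d, b) in state]  (b is None only outside Pre_: typed via .getD [])
  let best := state.map (fun s => s.2.getD [])
  -- out.append(tuple(best[:len(row)])); best = best[len(row):]
  (pixels.foldl
    (fun (acc : List (List (List Int)) × List (List Int)) row =>
      (acc.1 ++ [PySem.List.slice acc.2 none (some (row.length : Int))],
       PySem.List.slice acc.2 (some (row.length : Int)) none))
    ([], best)).1

-- ===== PRECONDITION & SPEC =====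
-- Pre_ excludes exactly the inputs where Python A raises: when some pixel exists, min() needs a
-- nonempty palette (else ValueError) and _color_dist_sq indexes [0..2] of every pixel and palette
-- color (else IndexError).
def Pre_snap_to_palette_py (pixels : List (List (List Int))) (palette : List (List Int)) : Prop :=
  (∃ row ∈ pixels, row ≠ []) →
    (palette ≠ [] ∧ (∀ c ∈ palette, 3 ≤ c.length) ∧ ∀ row ∈ pixels, ∀ p ∈ row, 3 ≤ p.length)
instance (pixels : List (List (List Int))) (palette : List (List Int)) : Decidable (Pre_snap_to_palette_py pixels palette) := by unfold Pre_snap_to_palette_py; infer_instance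

def pvWitness_snap_to_palette_py : List (List (List Int)) × List (List Int) :=
  ([[[1, 2, 3], [9, 9, 9]], [[1, 2, 3]]], [[0, 0, 0], [8, 8, 8]])

def Spec_snap_to_palette_py (pixels : List (List (List Int))) (palette : List (List Int)) (out : List (List (List Int))) : Prop := out = snap_to_palette_py_alt pixels palette
instance (pixels : List (List (List Int))) (palette : List (List Int)) (out : List (List (List Int))) : Decidable (Spec_snap_to_palette_py pixels palette out) := by unfold Spec_snap_to_palette_py; infer_instance

-- ===== CLAIM (what is proved, stated in full; the proofs are below) =====
def Claim_equal_snap_to_palette_py : Prop := ∀ (pixels : List (List (List Int))) (palette : List (List Int)), Dom_snap_to_palette_py pixels palette → Pre_snap_to_palette_py pixels palette → Spec_snap_to_palette_py pixels palette (snap_to_palette_py pixels palette)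

-- ===== LEMMAS AND PROOFS =====

-- the nearest palette color both programs compute for one pixel
def pvBest (palette : List (List Int)) (p : List Int) : List Int :=
  (PySem.List.min? palette (fun c => pvColorDistSq p c)).getD []

-- the cache invariant of A's loop: every stored value is the nearest color of its key
def pvInv (palette : List (List Int)) (d : PySem.Dict (List Int) (List Int)) : Prop :=
  ∀ k v, d.get? k = some v → v = pvBest palette k

lemma pvInv_empty (palette : List (List Int)) : pvInv palette PySem.Dict.empty := by
  intro k v h
  simp [PySem.Dict.empty, PySem.Dict.get?] at h

lemma pvInv_insert (palette : List (List Int)) (d : PySem.Dict (List Int) (List Int))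
    (p : List Int) (h : pvInv palette d) :
    pvInv palette (d.insert p (pvBest palette p)) := by
  intro k v hk
  by_cases hkp : k = p
  · subst hkp
    rw [PySem.Dict.get?_insert_self] at hk
    exact (Option.some.injEq _ _ ▸ hk).symm
  · rw [PySem.Dict.get?_insert_of_ne d _ hkp] at hk
    exact h k v hk

-- A's inner loop over one row, from any cache satisfying the invariant
lemma pvA_row (palette : List (List Int)) (row : List (List Int)) :
    ∀ (d : PySem.Dict (List Int) (List Int)) (acc : List (List Int)), pvInv palette d →
      (row.foldl
        (fun (s : PySem.Dict (List Int) (List Int) × List (List Int)) pixel =>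
          match s.1.get? pixel with
          | some v => (s.1, s.2 ++ [v])
          | none =>
            let best := (PySem.List.min? palette (fun c => pvColorDistSq pixel c)).getD []
            (s.1.insert pixel best, s.2 ++ [best]))
        (d, acc)).2 = acc ++ row.map (pvBest palette) ∧
      pvInv palette (row.foldl
        (fun (s : PySem.Dict (List Int) (List Int) × List (List Int)) pixel =>
          match s.1.get? pixel with
          | some v => (s.1, s.2 ++ [v])
          | none =>
            let best := (PySem.List.min? palette (fun c => pvColorDistSq pixel c)).getD []
            (s.1.insert pixel best, s.2 ++ [best]))
        (d, acc)).1 := by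
  induction row with
  | nil => intro d acc h; exact ⟨by simp, h⟩
  | cons pixel rest ih =>
    intro d acc h
    simp only [List.foldl_cons]
    cases hget : d.get? pixel with
    | some v =>
      have hv : v = pvBest palette pixel := h pixel v hget
      have := ih d (acc ++ [v]) h
      simp only [hget] at *
      refine ⟨?_, this.2⟩
      rw [this.1, hv]
      simp
    | none =>
      have hinv := pvInv_insert palette d pixel h
      have := ih (d.insert pixel (pvBest palette pixel)) (acc ++ [pvBest palette pixel]) hinv
      simp only [pvBest] at this ⊢
      refine ⟨?_, this.2⟩
      rw [this.1]
      simp [pvBest]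

-- A's outer loop over the rows
lemma pvA_rows (palette : List (List Int)) (rows : List (List (List Int))) :
    ∀ (d : PySem.Dict (List Int) (List Int)) (acc : List (List (List Int))), pvInv palette d →
      (rows.foldl
        (fun (st : PySem.Dict (List Int) (List Int) × List (List (List Int))) row =>
          let inner := row.foldl
            (fun (s : PySem.Dict (List Int) (List Int) × List (List Int)) pixel =>
              match s.1.get? pixel with
              | some v => (s.1, s.2 ++ [v])
              | none =>
                let best := (PySem.List.min? palette (fun c => pvColorDistSq pixel c)).getD []
                (s.1.insert pixel best, s.2 ++ [best]))
            (st.1, [])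
          (inner.1, st.2 ++ [inner.2]))
        (d, acc)).2 = acc ++ rows.map (fun row => row.map (pvBest palette)) := by
  induction rows with
  | nil => intro d acc _; simp
  | cons row rest ih =>
    intro d acc h
    simp only [List.foldl_cons]
    have hrow := pvA_row palette row d [] h
    rw [ih _ _ hrow.2, hrow.1]
    simp

-- one pixel's relaxation step of B's sweep
def pvRelax (p : List Int) (s : Option Int × Option (List Int)) (c : List Int) :
    Option Int × Option (List Int) :=
  match s.1 with
  | some d => if pvColorDistSq p c ≥ d then s else (some (pvColorDistSq p c), some c)
  | none => (some (pvColorDistSq p c), some c)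

-- B's sweep over the palette acts elementwise on the flat state array
lemma pvB_fold_map (palette : List (List Int)) (flat : List (List Int)) :
    ∀ (g : List Int → Option Int × Option (List Int)),
      palette.foldl
        (fun (state : List (Option Int × Option (List Int))) c =>
          (state.zip flat).map (fun sp =>
            match sp.1.1 with
            | some d => if pvColorDistSq sp.2 c ≥ d then sp.1 else (some (pvColorDistSq sp.2 c), some c)
            | none => (some (pvColorDistSq sp.2 c), some c)))
        (flat.map g)
      = flat.map (fun p => palette.foldl (pvRelax p) (g p)) := by
  induction palette with
  | nil => intro g; simp
  | cons c rest ih =>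
    intro g
    simp only [List.foldl_cons]
    have hzip : (flat.map g).zip flat = flat.map (fun p => (g p, p)) := by
      simpa using @List.zip_map' _ _ _ g id flat
    rw [hzip, List.map_map]
    have := ih (fun p => pvRelax p (g p) c)
    rw [← this]
    rfl

-- min() over b::c::t keeps the earlier element on ties: reduce the first comparison
lemma pvMin_cons_cons (p b c : List Int) (t : List (List Int)) :
    PySem.List.min? (b :: c :: t) (fun x => pvColorDistSq p x)
      = PySem.List.min? ((if pvColorDistSq p c < pvColorDistSq p b then c else b) :: t)
          (fun x => pvColorDistSq p x) := by
  by_cases h : pvColorDistSq p c < pvColorDistSq p b <;>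
    simp [PySem.List.min?, h]

lemma pvBest_cons_cons (p b c : List Int) (t : List (List Int)) :
    pvBest (b :: c :: t) p
      = pvBest ((if pvColorDistSq p c < pvColorDistSq p b then c else b) :: t) p := by
  simp only [pvBest]
  rw [pvMin_cons_cons]

-- the relaxation fold seeded with color b computes min over b :: remaining palette
lemma pvPixAux (p : List Int) :
    ∀ (t : List (List Int)) (b : List Int),
      ((t.foldl (pvRelax p) (some (pvColorDistSq p b), some b)).2).getD []
        = pvBest (b :: t) p := by
  intro t
  induction t with
  | nil => intro b; simp [pvBest, PySem.List.min?]
  | cons c t ih =>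
    intro b
    rw [pvBest_cons_cons]
    simp only [List.foldl_cons, pvRelax]
    by_cases h : pvColorDistSq p c < pvColorDistSq p b
    · rw [if_pos h, if_neg (not_le.mpr h)]
      exact ih c
    · rw [if_neg h, if_pos (not_lt.mp h)]
      exact ih b

-- for a nonempty palette, one pixel's relaxation result is its nearest palette color
lemma pvPix (p : List Int) (c : List Int) (rest : List (List Int)) :
    ((((c :: rest).foldl (pvRelax p) (none, none)).2).getD []) = pvBest (c :: rest) p := by
  simp only [List.foldl_cons, pvRelax]
  exact pvPixAux p rest c

-- B's re-chunking loop splits the flat mapped array back into the original rows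
lemma pvChunk (f : List Int → List Int) :
    ∀ (rows : List (List (List Int))) (acc : List (List (List Int))),
      (rows.foldl
        (fun (acc : List (List (List Int)) × List (List Int)) row =>
          (acc.1 ++ [PySem.List.slice acc.2 none (some (row.length : Int))],
           PySem.List.slice acc.2 (some (row.length : Int)) none))
        (acc, (rows.flatMap (fun r => r)).map f)).1
      = acc ++ rows.map (fun row => row.map f) := by
  intro rows
  induction rows with
  | nil => intro acc; simp
  | cons row rest ih =>
    intro acc
    simp only [List.flatMap_cons, List.map_append, List.foldl_cons]
    rw [PySem.List.slice_to_natCast, PySem.List.slice_from_natCast,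
        List.take_left' (by simp), List.drop_left' (by simp)]
    have := ih (acc ++ [row.map f])
    simpa using this

-- ===== VERDICT (by name: the statement is the Claim_ definition above) =====
theorem snap_to_palette_py_spec : Claim_equal_snap_to_palette_py := by
  intro pixels palette _ hpre
  unfold Spec_snap_to_palette_py snap_to_palette_py snap_to_palette_py_alt
  rw [pvA_rows palette pixels PySem.Dict.empty [] (pvInv_empty palette)]
  simp only [List.nil_append]
  have hrepl : List.replicate (pixels.flatMap (fun row => row)).length
      ((none : Option Int), (none : Option (List Int)))
      = (pixels.flatMap (fun row => row)).map (fun _ => (none, none)) := by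
    rw [List.map_const']
  rw [hrepl, pvB_fold_map palette (pixels.flatMap (fun row => row)) (fun _ => (none, none)),
      List.map_map]
  have hchunk := pvChunk
    (fun p => ((palette.foldl (pvRelax p) ((none : Option Int), (none : Option (List Int)))).2).getD [])
    pixels []
  simp only [Function.comp_def] at hchunk ⊢
  rw [hchunk, List.nil_append]
  refine (List.map_congr_left ?_).symm
  intro row hrow
  refine List.map_congr_left ?_
  intro p hp
  have hne : palette ≠ [] := (hpre ⟨row, hrow, by rintro rfl; cases hp⟩).1
  obtain ⟨c, rest, rfl⟩ : ∃ c rest, palette = c :: rest := by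
    cases palette with
    | nil => exact absurd rfl hne
    | cons c rest => exact ⟨c, rest, rfl⟩
  exact pvPix p c rest
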